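-- pv_equiv track=rewrite | github.com/jms7446/hackerrank | baekjoon/alg-study/w21/p1_p16957.py | solve
-- ===== SOURCE A (Python) =====
-- from itertools import product
-- from collections import defaultdict
--
-- class Direction:
--     def __init__(self, dir_type, R, C):
--         if dir_type == 4:
--             self.directions = [(0, 1), (1, 0), (0, -1), (-1, 0)]
--         elif dir_type == 8:
--             self.directions = [(0, 1), (1, 1), (1, 0), (1, -1), (0, -1), (-1, -1), (-1, 0), (-1, 1)]
--         else:
--             raise Exception(f'Unknown dir_type: {dir_type}')
--         self.R = R
--         self.C = C
--
--     def iter_next(self, point):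
--         pr, pc = point
--         for dr, dc in self.directions:
--             r, c = pr + dr, pc + dc
--             if 0 <= r < self.R and 0 <= c < self.C:
--                 yield r, c
--
-- def tree_size(point, children_map):
--     count = 0
--     stack = [point]
--     while stack:
--         fr = stack.pop()
--         count += 1
--         if fr not in children_map:
--             continue
--         for fr2 in children_map[fr]:
--             stack.append(fr2)
--     return count
--
-- def solve(R, C, grid):
--     def get_height(point):
--         return grid[point[0]][point[1]]
--
--     if R == 1 and C == 1:
--         return [[1]]
--
--     roots = set()
--     children_map = defaultdict(list)
--     direction = Direction(8, R, C)
--     for cur_point in product(range(R), range(C)):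
--         neighbor_heights = ((get_height(neighbor), neighbor) for neighbor in direction.iter_next(cur_point))
--         min_height, neighbor = min(neighbor_heights)
--         if min_height < get_height(cur_point):
--             children_map[neighbor].append(cur_point)
--         else:
--             roots.add(cur_point)
--     return [[tree_size((r, c), children_map) if (r, c) in roots else 0 for c in range(C)] for r in range(R)]
-- ===== SOURCE B (Python) =====
-- def solve(R, C, grid):
--     # parent-pointer forest + root chasing instead of children lists + DFS
--     if R == 1 and C == 1:
--         return [[1]]
--     dirs = [(0, 1), (1, 1), (1, 0), (1, -1), (0, -1), (-1, -1), (-1, 0), (-1, 1)]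
--     parent = {}
--     for r in range(R):
--         for c in range(C):
--             cands = [(grid[r + dr][c + dc], (r + dr, c + dc))
--                      for dr, dc in dirs
--                      if 0 <= r + dr < R and 0 <= c + dc < C]
--             min_height, nbr = min(cands)
--             parent[(r, c)] = nbr if min_height < grid[r][c] else None
--     counts = {}
--     for cell in parent:
--         while parent[cell] is not None:
--             cell = parent[cell]
--         counts[cell] = counts.get(cell, 0) + 1
--     return [[counts.get((r, c), 0) if parent[(r, c)] is None else 0
--              for c in range(C)] for r in range(R)]
-- ===== Notes on version B (the rewrite author's own statement) =====
-- stated objective: alternative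
-- what changed: Replaces A's children-lists (defaultdict of child lists) plus explicit-stack DFS per root by the inverted representation: each cell stores a parent pointer to its minimal neighbor, and tree sizes are obtained by chasing every cell's parent chain up to its root and counting arrivals per root.
import Mathlib
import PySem

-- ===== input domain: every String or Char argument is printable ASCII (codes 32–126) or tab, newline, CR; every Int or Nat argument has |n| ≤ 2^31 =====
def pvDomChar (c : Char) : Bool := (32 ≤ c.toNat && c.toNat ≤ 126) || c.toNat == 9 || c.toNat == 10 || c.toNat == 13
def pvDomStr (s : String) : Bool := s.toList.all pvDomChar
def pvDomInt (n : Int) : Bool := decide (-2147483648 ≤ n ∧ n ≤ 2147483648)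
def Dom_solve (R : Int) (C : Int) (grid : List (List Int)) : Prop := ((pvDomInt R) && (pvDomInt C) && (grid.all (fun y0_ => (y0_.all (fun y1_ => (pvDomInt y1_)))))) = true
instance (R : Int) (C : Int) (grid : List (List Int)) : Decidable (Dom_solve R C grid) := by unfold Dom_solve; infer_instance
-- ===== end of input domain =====

-- B replaces A's children-lists + explicit-stack DFS per root by parent pointers:
-- every cell points to its minimal neighbor, sizes are counted by chasing each
-- cell's parent chain to its root (return values proved equal; no mutation).

-- ===== PORT A =====
-- shared per-cell helpers (both Pythons contain the identical min-of-neighbors expression)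

-- 0 <= r < R and 0 <= c < C
def pvInRange (R C : Int) (p : Int × Int) : Bool :=
  decide (0 ≤ p.1) && decide (p.1 < R) && decide (0 ≤ p.2) && decide (p.2 < C)

-- Direction(8, R, C).iter_next(p): in-range neighbors in direction order (exact)
def pvNbrs (R C : Int) (p : Int × Int) : List (Int × Int) :=
  ([(0,1),(1,1),(1,0),(1,-1),(0,-1),(-1,-1),(-1,0),(-1,1)] : List (Int × Int)).filterMap
    (fun d =>
      let q := (p.1 + d.1, p.2 + d.2)
      if pvInRange R C q then some q else none)

-- get_height / grid[r][c]; total with defaults — exact under Pre_solve (all accessed indices in range)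
def pvHeight (grid : List (List Int)) (p : Int × Int) : Int :=
  PySem.List.pyGetD (PySem.List.pyGetD grid p.1 []) p.2 0

-- Python '<' on tuples (h, (r, c)): lexicographic (ported by hand: nested tuple key)
def pvLt (a b : Int × (Int × Int)) : Bool :=
  decide (a.1 < b.1 ∨ (a.1 = b.1 ∧ (a.2.1 < b.2.1 ∨ (a.2.1 = b.2.1 ∧ a.2.2 < b.2.2))))

-- min(iterable) of tuples: first element, then running min keeping the earlier on ties (exact; none = ValueError)
def pvMin : List (Int × (Int × Int)) → Option (Int × (Int × Int))
  | [] => none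
  | x :: t => some (t.foldl (fun m y => if pvLt y m then y else m) x)

-- product(range(R), range(C)) (also the row/column loop order of B)
def pvCells (R C : Int) : List (Int × Int) :=
  (PySem.List.pyRange 0 R 1).flatMap (fun r => (PySem.List.pyRange 0 C 1).map (fun c => (r, c)))

-- tree_size: the while-stack loop; fuel R*C+1 provably covers every pop on the maps solve builds
def treeSizeA : Nat → List (Int × Int) → Int → PySem.Dict (Int × Int) (List (Int × Int)) → Int
  | 0, _, count, _ => count
  | fuel+1, stack, count, cmap =>
    match stack.getLast? with
    | none => count
    | some fr =>
      match cmap.get? fr with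
      | none => treeSizeA fuel stack.dropLast (count + 1) cmap
      | some children => treeSizeA fuel (stack.dropLast ++ children) (count + 1) cmap

def solve (R : Int) (C : Int) (grid : List (List Int)) : List (List Int) :=
  if R = 1 ∧ C = 1 then [[1]]
  else
    -- one loop, two accumulators: roots (a set) and children_map (defaultdict(list) append = modify)
    let st := (pvCells R C).foldl (fun st p =>
        match pvMin ((pvNbrs R C p).map (fun n => (pvHeight grid n, n))) with
        | none => st  -- min() of an empty generator raises in Python; only reachable for R = C = 1, handled above
        | some mn =>
          if mn.1 < pvHeight grid p then (st.1, PySem.Dict.modify st.2 mn.2 [] (· ++ [p]))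
          else (PySem.Set.add st.1 p, st.2))
      ((PySem.Set.empty : PySem.Set (Int × Int)),
       (PySem.Dict.empty : PySem.Dict (Int × Int) (List (Int × Int))))
    (PySem.List.pyRange 0 R 1).map (fun r =>
      (PySem.List.pyRange 0 C 1).map (fun c =>
        if PySem.Set.contains st.1 (r, c) then treeSizeA (R.toNat * C.toNat + 1) [(r, c)] 0 st.2 else 0))

-- ===== PORT B =====

-- parent[(r,c)] = min neighbor if strictly lower, else None
def parentMap (R C : Int) (grid : List (List Int)) : PySem.Dict (Int × Int) (Option (Int × Int)) :=
  (pvCells R C).foldl (fun d p =>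
      match pvMin ((pvNbrs R C p).map (fun n => (pvHeight grid n, n))) with
      | none => d  -- min() of [] raises in Python; only reachable for R = C = 1, handled in solve_alt
      | some mn => d.insert p (if mn.1 < pvHeight grid p then some mn.2 else none))
    PySem.Dict.empty

-- while parent[cur] is not None: cur = parent[cur] ; fuel R*C provably covers the chain length
def chaseB : Nat → (Int × Int) → PySem.Dict (Int × Int) (Option (Int × Int)) → (Int × Int)
  | 0, p, _ => p
  | fuel+1, p, d =>
    match d.get? p with
    | some (some q) => chaseB fuel q d
    | _ => p

def solve_alt (R : Int) (C : Int) (grid : List (List Int)) : List (List Int) :=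
  if R = 1 ∧ C = 1 then [[1]]
  else
    let par := parentMap R C grid
    -- for cell in parent: counts[root of cell] += 1 (parent's keys are exactly pvCells in order)
    let counts := (pvCells R C).foldl (fun cnt p =>
        let root := chaseB (R.toNat * C.toNat) p par
        cnt.insert root (cnt.getD root 0 + 1))
      (PySem.Dict.empty : PySem.Dict (Int × Int) Int)
    (PySem.List.pyRange 0 R 1).map (fun r =>
      (PySem.List.pyRange 0 C 1).map (fun c =>
        match par.get? (r, c) with
        | some none => counts.getD (r, c) 0
        | _ => 0))

-- ===== PRECONDITION & SPEC =====
-- Pre_solve excludes exactly the inputs where A raises IndexError: some accessed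
-- grid cell is missing (grid shorter than R rows, or an accessed row shorter than C).
def Pre_solve (R : Int) (C : Int) (grid : List (List Int)) : Prop :=
  (R = 1 ∧ C = 1) ∨ R ≤ 0 ∨ C ≤ 0 ∨
  (R ≤ (grid.length : Int) ∧ ∀ row ∈ grid.take R.toNat, C ≤ (row.length : Int))
instance (R : Int) (C : Int) (grid : List (List Int)) : Decidable (Pre_solve R C grid) := by
  unfold Pre_solve; infer_instance

def pvWitness_solve : Int × Int × List (List Int) := (2, 2, [[1, 2], [3, 4]])

def Spec_solve (R : Int) (C : Int) (grid : List (List Int)) (out : List (List Int)) : Prop := out = solve_alt R C grid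
instance (R : Int) (C : Int) (grid : List (List Int)) (out : List (List Int)) : Decidable (Spec_solve R C grid out) := by unfold Spec_solve; infer_instance

-- ===== CLAIM (what is proved, stated in full; the proofs are below) =====
def Claim_equal_solve : Prop := ∀ (R : Int) (C : Int) (grid : List (List Int)), Dom_solve R C grid → Pre_solve R C grid → Spec_solve R C grid (solve R C grid)

-- ===== LEMMAS AND PROOFS =====

-- the per-cell decision both loops make: none = min() would raise (no neighbor),
-- some none = cell is a root, some (some n) = cell's parent is n
def gfun (R C : Int) (grid : List (List Int)) (p : Int × Int) : Option (Option (Int × Int)) :=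
  match pvMin ((pvNbrs R C p).map (fun n => (pvHeight grid n, n))) with
  | none => none
  | some mn => some (if mn.1 < pvHeight grid p then some mn.2 else none)

def pfun (R C : Int) (grid : List (List Int)) (p : Int × Int) : Option (Int × Int) :=
  match gfun R C grid p with
  | some (some n) => some n
  | _ => none

-- number of cells strictly lower than p: the termination measure of parent chains
def hMeasure (R C : Int) (grid : List (List Int)) (p : Int × Int) : Nat :=
  ((pvCells R C).filter (fun x => pvHeight grid x < pvHeight grid p)).length


theorem pvMin_mem {l : List (Int × (Int × Int))} {x : Int × (Int × Int)}
    (h : pvMin l = some x) : x ∈ l := by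
  match l with
  | [] => simp [pvMin] at h
  | a :: t =>
    simp only [pvMin, Option.some.injEq] at h
    subst h
    induction t generalizing a with
    | nil => simp
    | cons y t ih =>
      have := ih (if pvLt y a then y else a)
      by_cases hb : pvLt y a <;> simp [hb] at this ⊢ <;> tauto

theorem mem_pvCells {R C : Int} {p : Int × Int} :
    p ∈ pvCells R C ↔ 0 ≤ p.1 ∧ p.1 < R ∧ 0 ≤ p.2 ∧ p.2 < C := by
  obtain ⟨a, b⟩ := p
  simp [pvCells, List.mem_flatMap, PySem.List.mem_pyRange_one]
  tauto

theorem pvCells_eq_product (R C : Int) :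
    pvCells R C = (PySem.List.pyRange 0 R 1) ×ˢ (PySem.List.pyRange 0 C 1) := by
  simp [pvCells, SProd.sprod, List.product]

theorem nodup_pvCells (R C : Int) : (pvCells R C).Nodup := by
  rw [pvCells_eq_product]
  exact List.Nodup.product (PySem.List.nodup_pyRange_one _ _) (PySem.List.nodup_pyRange_one _ _)

theorem length_pvCells (R C : Int) : (pvCells R C).length = R.toNat * C.toNat := by
  rw [pvCells_eq_product, List.length_product]
  simp [PySem.List.length_pyRange_one]

theorem pfun_spec {R C : Int} {grid : List (List Int)} {p n : Int × Int}
    (h : pfun R C grid p = some n) :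
    pvHeight grid n < pvHeight grid p ∧ n ∈ pvCells R C := by
  unfold pfun gfun at h
  rcases hm : pvMin ((pvNbrs R C p).map (fun n => (pvHeight grid n, n))) with _ | mn
  · rw [hm] at h; simp at h
  · rw [hm] at h
    by_cases hlt : mn.1 < pvHeight grid p
    · simp only [if_pos hlt] at h
      cases h
      have hmem := pvMin_mem hm
      simp only [List.mem_map] at hmem
      obtain ⟨n', hn', he⟩ := hmem
      have h1 : mn.1 = pvHeight grid n' := by rw [← he]
      have h2 : mn.2 = n' := by rw [← he]
      constructor
      · rw [h2, ← h1]; exact hlt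
      · rw [h2]
        simp only [pvNbrs, List.mem_filterMap] at hn'
        obtain ⟨d, _, hd⟩ := hn'
        by_cases hr : pvInRange R C (p.1 + d.1, p.2 + d.2)
        · simp only [if_pos hr, Option.some.injEq] at hd
          subst hd
          simp only [pvInRange, Bool.and_eq_true, decide_eq_true_eq] at hr
          exact mem_pvCells.mpr ⟨hr.1.1.1, hr.1.1.2, hr.1.2, hr.2⟩
        · simp [hr] at hd
    · simp [if_neg hlt] at h

theorem filter_length_strict {α : Type} {l : List α} {P Q : α → Bool}
    (hmono : ∀ a ∈ l, P a = true → Q a = true) {x : α} (hx : x ∈ l)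
    (hQ : Q x = true) (hP : P x = false) :
    (l.filter P).length < (l.filter Q).length := by
  have h1 : l.filter P = (l.filter Q).filter P := by
    rw [List.filter_filter]
    apply List.filter_congr
    intro a ha
    by_cases hp : P a = true
    · simp [hp, hmono a ha hp]
    · simp [Bool.eq_false_iff.mpr hp]
  rw [h1]
  apply List.length_filter_lt_length_iff_exists.mpr
  exact ⟨x, List.mem_filter.mpr ⟨hx, hQ⟩, by simp [hP]⟩

theorem pfun_measure_lt {R C : Int} {grid : List (List Int)} {p n : Int × Int}
    (h : pfun R C grid p = some n) : hMeasure R C grid n < hMeasure R C grid p := by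
  obtain ⟨hlt, hmem⟩ := pfun_spec h
  unfold hMeasure
  apply filter_length_strict (x := n) ?_ hmem (by simpa using hlt) (by simp)
  intro a _ ha
  simp only [decide_eq_true_eq] at *
  omega

theorem hMeasure_lt_length {R C : Int} {grid : List (List Int)} {p : Int × Int}
    (h : p ∈ pvCells R C) : hMeasure R C grid p < (pvCells R C).length := by
  unfold hMeasure
  apply List.length_filter_lt_length_iff_exists.mpr
  exact ⟨p, h, by simp⟩

-- the ancestor chain of a cell: the cell, then its parent's chain (terminates: hMeasure decreases)
def chainP (R C : Int) (grid : List (List Int)) (p : Int × Int) : List (Int × Int) :=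
  p :: (match h : pfun R C grid p with
        | some n => chainP R C grid n
        | none => [])
termination_by hMeasure R C grid p
decreasing_by exact pfun_measure_lt h

-- the root reached from a cell by following parents
def rootP (R C : Int) (grid : List (List Int)) (p : Int × Int) : Int × Int :=
  match h : pfun R C grid p with
  | some n => rootP R C grid n
  | none => p
termination_by hMeasure R C grid p
decreasing_by exact pfun_measure_lt h

theorem chainP_of_none {R C : Int} {grid : List (List Int)} {p : Int × Int}
    (h : pfun R C grid p = none) : chainP R C grid p = [p] := by
  rw [chainP]
  split
  · next n heq => rw [h] at heq; cases heq
  · rfl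

theorem chainP_of_some {R C : Int} {grid : List (List Int)} {p n : Int × Int}
    (h : pfun R C grid p = some n) : chainP R C grid p = p :: chainP R C grid n := by
  rw [chainP]
  split
  · next n' heq => rw [h] at heq; cases heq; rfl
  · next heq => rw [h] at heq; cases heq

theorem rootP_of_none {R C : Int} {grid : List (List Int)} {p : Int × Int}
    (h : pfun R C grid p = none) : rootP R C grid p = p := by
  rw [rootP]
  split
  · next n heq => rw [h] at heq; cases heq
  · rfl

theorem rootP_of_some {R C : Int} {grid : List (List Int)} {p n : Int × Int}
    (h : pfun R C grid p = some n) : rootP R C grid p = rootP R C grid n := by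
  rw [rootP]
  split
  · next n' heq => rw [h] at heq; cases heq; rfl
  · next heq => rw [h] at heq; cases heq

theorem mem_chainP_self {R C : Int} {grid : List (List Int)} (p : Int × Int) :
    p ∈ chainP R C grid p := by
  rw [chainP]; exact List.mem_cons_self

theorem mem_chainP_elim {R C : Int} {grid : List (List Int)} {p q : Int × Int}
    (h : q ∈ chainP R C grid p) :
    q = p ∨ ∃ n, pfun R C grid p = some n ∧ q ∈ chainP R C grid n := by
  rcases hp : pfun R C grid p with _ | n
  · rw [chainP_of_none hp] at h; simp at h; exact Or.inl h
  · rw [chainP_of_some hp] at h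
    rcases List.mem_cons.mp h with h | h
    · exact Or.inl h
    · exact Or.inr ⟨n, rfl, h⟩

theorem height_le_of_mem_chainP {R C : Int} {grid : List (List Int)} {p q : Int × Int}
    (h : q ∈ chainP R C grid p) : pvHeight grid q ≤ pvHeight grid p := by
  induction p using chainP.induct R C grid with
  | _ p ih =>
    rcases mem_chainP_elim h with rfl | ⟨n, hn, hq⟩
    · exact le_refl _
    · exact le_of_lt (lt_of_le_of_lt (ih n hn hq) (pfun_spec hn).1)

theorem chainP_subset {R C : Int} {grid : List (List Int)} {p q : Int × Int}
    (h : q ∈ chainP R C grid p) : ∀ y ∈ chainP R C grid q, y ∈ chainP R C grid p := by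
  induction p using chainP.induct R C grid with
  | _ p ih =>
    rcases mem_chainP_elim h with rfl | ⟨n, hn, hq⟩
    · exact fun y hy => hy
    · intro y hy
      rw [chainP_of_some hn]
      exact List.mem_cons_of_mem _ (ih n hn hq y hy)

theorem mem_chainP_cells {R C : Int} {grid : List (List Int)} {p q : Int × Int}
    (hp : p ∈ pvCells R C) (h : q ∈ chainP R C grid p) : q ∈ pvCells R C := by
  induction p using chainP.induct R C grid with
  | _ p ih =>
    rcases mem_chainP_elim h with rfl | ⟨n, hn, hq⟩
    · exact hp
    · exact ih n hn (pfun_spec hn).2 hq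

theorem rootP_mem_chainP {R C : Int} {grid : List (List Int)} (p : Int × Int) :
    rootP R C grid p ∈ chainP R C grid p := by
  induction p using chainP.induct R C grid with
  | _ p ih =>
    rcases hp : pfun R C grid p with _ | n
    · rw [rootP_of_none hp, chainP_of_none hp]; simp
    · rw [rootP_of_some hp, chainP_of_some hp]
      exact List.mem_cons_of_mem _ (ih n hp)

theorem rootP_eq_of_mem {R C : Int} {grid : List (List Int)} {p q : Int × Int}
    (h : q ∈ chainP R C grid p) : rootP R C grid p = rootP R C grid q := by
  induction p using chainP.induct R C grid with
  | _ p ih =>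
    rcases mem_chainP_elim h with rfl | ⟨n, hn, hq⟩
    · rfl
    · rw [rootP_of_some hn]; exact ih n hn hq

theorem pred_exists {R C : Int} {grid : List (List Int)} {p q : Int × Int}
    (h : q ∈ chainP R C grid p) (hne : q ≠ p) :
    ∃ c, c ∈ chainP R C grid p ∧ pfun R C grid c = some q := by
  induction p using chainP.induct R C grid with
  | _ p ih =>
    rcases mem_chainP_elim h with rfl | ⟨n, hn, hq⟩
    · exact absurd rfl hne
    · by_cases hqn : q = n
      · subst hqn
        exact ⟨p, mem_chainP_self p, hn⟩
      · obtain ⟨c, hc, hcq⟩ := ih n hn hq hqn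
        rw [chainP_of_some hn]
        exact ⟨c, List.mem_cons_of_mem _ hc, hcq⟩

theorem chainP_linear {R C : Int} {grid : List (List Int)} {p c1 c2 : Int × Int}
    (h1 : c1 ∈ chainP R C grid p) (h2 : c2 ∈ chainP R C grid p) :
    c1 ∈ chainP R C grid c2 ∨ c2 ∈ chainP R C grid c1 := by
  induction p using chainP.induct R C grid with
  | _ p ih =>
    rcases mem_chainP_elim h1 with rfl | ⟨n, hn, hq1⟩
    · exact Or.inr h2
    · rcases mem_chainP_elim h2 with rfl | ⟨n', hn', hq2⟩
      · exact Or.inl h1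
      · rw [hn] at hn'
        cases hn'
        exact ih n hn hq1 hq2

theorem child_not_mem_chainP {R C : Int} {grid : List (List Int)} {c q : Int × Int}
    (h : pfun R C grid c = some q) : c ∉ chainP R C grid q := by
  intro hmem
  have h1 := height_le_of_mem_chainP hmem
  have h2 := (pfun_spec h).1
  omega

theorem mem_chainP_of_child {R C : Int} {grid : List (List Int)} {c q : Int × Int}
    (h : pfun R C grid c = some q) : q ∈ chainP R C grid c := by
  rw [chainP_of_some h]
  exact List.mem_cons_of_mem _ (mem_chainP_self q)

theorem unique_pred {R C : Int} {grid : List (List Int)} {x q c1 c2 : Int × Int}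
    (m1 : c1 ∈ chainP R C grid x) (m2 : c2 ∈ chainP R C grid x)
    (h1 : pfun R C grid c1 = some q) (h2 : pfun R C grid c2 = some q) : c1 = c2 := by
  rcases chainP_linear m1 m2 with h | h
  · rw [chainP_of_some h2] at h
    rcases List.mem_cons.mp h with h | h
    · exact h
    · exact absurd h (child_not_mem_chainP h1)
  · rw [chainP_of_some h1] at h
    rcases List.mem_cons.mp h with h | h
    · exact h.symm
    · exact absurd h (child_not_mem_chainP h2)

-- all cells whose ancestor chain passes through q (q's tree, including q)
def descL (R C : Int) (grid : List (List Int)) (q : Int × Int) : List (Int × Int) :=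
  (pvCells R C).filter (fun x => decide (q ∈ chainP R C grid x))

-- all cells whose parent is q (the order children_map[q] ends up with)
def childrenL (R C : Int) (grid : List (List Int)) (q : Int × Int) : List (Int × Int) :=
  (pvCells R C).filter (fun x => pfun R C grid x == some q)

theorem mem_childrenL {R C : Int} {grid : List (List Int)} {q c : Int × Int} :
    c ∈ childrenL R C grid q ↔ c ∈ pvCells R C ∧ pfun R C grid c = some q := by
  simp [childrenL]

theorem length_descL {R C : Int} {grid : List (List Int)} (q : Int × Int) :
    (descL R C grid q).length
      = (pvCells R C).countP (fun x => decide (q ∈ chainP R C grid x)) := by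
  simp [descL, ← List.countP_eq_length_filter]

theorem sum_sum_comm {α β : Type} (A : List α) (B : List β) (g : α → β → Nat) :
    (A.map (fun a => (B.map (fun b => g a b)).sum)).sum
      = (B.map (fun b => (A.map (fun a => g a b)).sum)).sum := by
  induction A with
  | nil => simp
  | cons a A ih =>
    simp only [List.map_cons, List.sum_cons, ih]
    rw [← List.sum_map_add]

theorem indicator_decomp {R C : Int} {grid : List (List Int)} {q x : Int × Int}
    (hq : q ∈ pvCells R C) (hx : x ∈ pvCells R C) :
    (if decide (q ∈ chainP R C grid x) = true then (1 : Nat) else 0)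
      = (if decide (x = q) = true then 1 else 0)
        + (childrenL R C grid q).countP (fun c => decide (c ∈ chainP R C grid x)) := by
  simp only [decide_eq_true_eq]
  by_cases hmem : q ∈ chainP R C grid x
  · rw [if_pos hmem]
    by_cases hxq : x = q
    · rw [if_pos hxq]
      have hz : (childrenL R C grid q).countP (fun c => decide (c ∈ chainP R C grid x)) = 0 := by
        apply List.countP_eq_zero.mpr
        intro c hc
        simp only [decide_eq_true_eq]
        rw [hxq]
        exact child_not_mem_chainP (mem_childrenL.mp hc).2
      omega
    · rw [if_neg hxq]
      obtain ⟨c0, hc0, hc0q⟩ := pred_exists hmem (fun h => hxq h.symm)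
      have hc0cells : c0 ∈ pvCells R C := mem_chainP_cells hx hc0
      have hone : (childrenL R C grid q).countP (fun c => decide (c ∈ chainP R C grid x)) = 1 := by
        have hcongr : (childrenL R C grid q).countP (fun c => decide (c ∈ chainP R C grid x))
            = (childrenL R C grid q).countP (fun c => c == c0) := by
          apply List.countP_congr
          intro c hc
          obtain ⟨_, hcq⟩ := mem_childrenL.mp hc
          simp only [decide_eq_true_eq, beq_iff_eq]
          constructor
          · intro hcx; exact unique_pred hcx hc0 hcq hc0q
          · intro he; subst he; exact hc0
        rw [hcongr, ← List.count_eq_countP]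
        exact List.count_eq_one_of_mem ((nodup_pvCells R C).filter _)
          (mem_childrenL.mpr ⟨hc0cells, hc0q⟩)
      omega
  · rw [if_neg hmem]
    have hxq : ¬ x = q := by
      intro h; subst h; exact hmem (mem_chainP_self x)
    rw [if_neg hxq]
    have hz : (childrenL R C grid q).countP (fun c => decide (c ∈ chainP R C grid x)) = 0 := by
      apply List.countP_eq_zero.mpr
      intro c hc
      simp only [decide_eq_true_eq]
      intro hcx
      exact hmem (chainP_subset hcx q (mem_chainP_of_child (mem_childrenL.mp hc).2))
    omega

theorem descL_decomp {R C : Int} {grid : List (List Int)} {q : Int × Int}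
    (hq : q ∈ pvCells R C) :
    (descL R C grid q).length
      = 1 + ((childrenL R C grid q).map (fun c => (descL R C grid c).length)).sum := by
  rw [length_descL, ← PySem.List.sum_map_ite_one_zero_nat]
  rw [List.map_congr_left (fun x hx => indicator_decomp hq hx)]
  rw [List.sum_map_add]
  have h1 : ((pvCells R C).map (fun x => if decide (x = q) = true then (1:Nat) else 0)).sum = 1 := by
    rw [PySem.List.sum_map_ite_one_zero_nat]
    have e : (fun x : Int × Int => decide (x = q)) = (fun x => x == q) := by
      funext x; by_cases h : x = q <;> simp [h]
    rw [e, ← List.count_eq_countP]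
    exact List.count_eq_one_of_mem (nodup_pvCells R C) hq
  rw [h1]
  congr 1
  have h2 : ∀ x, (childrenL R C grid q).countP (fun c => decide (c ∈ chainP R C grid x))
      = ((childrenL R C grid q).map (fun c => if decide (c ∈ chainP R C grid x) = true then (1:Nat) else 0)).sum := by
    intro x
    rw [PySem.List.sum_map_ite_one_zero_nat]
  rw [List.map_congr_left (fun x _ => h2 x)]
  rw [sum_sum_comm (pvCells R C) (childrenL R C grid q)
    (g := fun x c => if decide (c ∈ chainP R C grid x) = true then (1:Nat) else 0)]
  apply congrArg
  apply List.map_congr_left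
  intro c _
  rw [PySem.List.sum_map_ite_one_zero_nat, length_descL]

theorem length_descL_le {R C : Int} {grid : List (List Int)} (q : Int × Int) :
    (descL R C grid q).length ≤ R.toNat * C.toNat := by
  rw [← length_pvCells R C]
  exact List.length_filter_le _ _

theorem gfun_of_pfun_some {R C : Int} {grid : List (List Int)} {p n : Int × Int}
    (h : pfun R C grid p = some n) : gfun R C grid p = some (some n) := by
  unfold pfun at h
  rcases hg : gfun R C grid p with _ | v
  · rw [hg] at h; cases h
  · rcases v with _ | m
    · rw [hg] at h; cases h
    · rw [hg] at h; cases h; rfl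

theorem pfun_of_gfun {R C : Int} {grid : List (List Int)} {p n : Int × Int}
    (h : gfun R C grid p = some (some n)) : pfun R C grid p = some n := by
  unfold pfun; rw [h]

-- a fold step acting only on elements x with k x = some n
def stepK {α κ δ : Type} (k : α → Option κ) (f : δ → κ → α → δ) : δ → α → δ :=
  fun d x => match k x with
             | some n => f d n x
             | none => d

theorem get?_foldl_insert_opt {ν : Type} (l : List (Int × Int)) (k : (Int × Int) → Option ν)
    (d : PySem.Dict (Int × Int) ν) (x : Int × Int) :
    (l.foldl (stepK k (fun d v p => d.insert p v)) d).get? x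
      = match k x with
        | some v => if x ∈ l then some v else d.get? x
        | none => d.get? x := by
  induction l generalizing d with
  | nil => cases hk : k x <;> simp
  | cons p t ih =>
    simp only [List.foldl_cons]
    rcases hp : k p with _ | v
    · rw [show stepK k (fun d v p => d.insert p v) d p = d by simp [stepK, hp]]
      rw [ih]
      rcases hx : k x with _ | w
      · rfl
      · by_cases hxt : x ∈ t
        · simp [hxt]
        · have hxp : x ≠ p := by rintro rfl; rw [hp] at hx; cases hx
          simp [hxt, hxp]
    · rw [show stepK k (fun d v p => d.insert p v) d p = d.insert p v by simp [stepK, hp]]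
      rw [ih]
      rcases hx : k x with _ | w
      · have hxp : x ≠ p := by rintro rfl; rw [hp] at hx; cases hx
        exact PySem.Dict.get?_insert_of_ne _ _ hxp
      · by_cases hxt : x ∈ t
        · simp [hxt]
        · by_cases hxp : x = p
          · subst hxp
            rw [hp] at hx
            cases hx
            simp [hxt, PySem.Dict.get?_insert_self]
          · simp [hxt, hxp, PySem.Dict.get?_insert_of_ne _ _ hxp]

theorem parentMap_get? {R C : Int} {grid : List (List Int)} (x : Int × Int) :
    (parentMap R C grid).get? x
      = if x ∈ pvCells R C then gfun R C grid x else none := by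
  have hbody : (fun (d : PySem.Dict (Int × Int) (Option (Int × Int))) p =>
      match pvMin ((pvNbrs R C p).map (fun n => (pvHeight grid n, n))) with
      | none => d
      | some mn => d.insert p (if mn.1 < pvHeight grid p then some mn.2 else none))
      = stepK (gfun R C grid) (fun d v p => d.insert p v) := by
    funext d p
    unfold stepK gfun
    rcases hm : pvMin ((pvNbrs R C p).map (fun n => (pvHeight grid n, n))) with _ | mn <;> rfl
  unfold parentMap
  rw [hbody, get?_foldl_insert_opt]
  rcases hg : gfun R C grid x with _ | v
  · simp [PySem.Dict.get?_empty]
  · by_cases hx : x ∈ pvCells R C <;> simp [hx, PySem.Dict.get?_empty]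

theorem foldl_opt_pair {α κ δ : Type} (l : List α) (k : α → Option κ) (f : δ → κ → α → δ) (d : δ) :
    l.foldl (stepK k f) d
      = (l.filterMap (fun x => (k x).map (fun n => (n, x)))).foldl (fun d px => f d px.1 px.2) d := by
  induction l generalizing d with
  | nil => rfl
  | cons x t ih =>
    simp only [List.foldl_cons, List.filterMap_cons]
    rcases hk : k x with _ | n
    · rw [show stepK k f d x = d by simp [stepK, hk]]
      simp [ih]
    · rw [show stepK k f d x = f d n x by simp [stepK, hk]]
      simp [ih]

theorem filterMap_filter_snd {α κ : Type} [BEq κ] [LawfulBEq κ] (l : List α) (k : α → Option κ) (q : κ) :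
    ((l.filterMap (fun x => (k x).map (fun n => (n, x)))).filter (fun px => px.1 == q)).map (fun px => px.2)
      = l.filter (fun x => k x == some q) := by
  induction l with
  | nil => rfl
  | cons x t ih =>
    simp only [List.filterMap_cons]
    rcases hk : k x with _ | n
    · simpa [hk] using ih
    · rcases eq_or_ne n q with hn | hn
      · subst hn; simpa [hk] using congrArg (List.cons x) ih
      · simpa [hk, hn] using ih

-- the two accumulators of solve's loop
def rootsAcc (R C : Int) (grid : List (List Int)) : PySem.Set (Int × Int) :=
  (pvCells R C).foldl
    (fun s p => if gfun R C grid p = some none then PySem.Set.add s p else s) PySem.Set.empty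

def cmapAcc (R C : Int) (grid : List (List Int)) : PySem.Dict (Int × Int) (List (Int × Int)) :=
  (pvCells R C).foldl
    (stepK (pfun R C grid) (fun d n p => d.modify n [] (· ++ [p]))) PySem.Dict.empty

theorem solve_st (R C : Int) (grid : List (List Int)) :
    (pvCells R C).foldl (fun st p =>
        match pvMin ((pvNbrs R C p).map (fun n => (pvHeight grid n, n))) with
        | none => st
        | some mn =>
          if mn.1 < pvHeight grid p then (st.1, PySem.Dict.modify st.2 mn.2 [] (· ++ [p]))
          else (PySem.Set.add st.1 p, st.2))
      ((PySem.Set.empty : PySem.Set (Int × Int)),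
       (PySem.Dict.empty : PySem.Dict (Int × Int) (List (Int × Int))))
      = (rootsAcc R C grid, cmapAcc R C grid) := by
  have hbody : (fun (st : PySem.Set (Int × Int) × PySem.Dict (Int × Int) (List (Int × Int))) p =>
      match pvMin ((pvNbrs R C p).map (fun n => (pvHeight grid n, n))) with
      | none => st
      | some mn =>
        if mn.1 < pvHeight grid p then (st.1, PySem.Dict.modify st.2 mn.2 [] (· ++ [p]))
        else (PySem.Set.add st.1 p, st.2))
      = (fun st p =>
        ((fun s p => if gfun R C grid p = some none then PySem.Set.add s p else s) st.1 p,
         stepK (pfun R C grid) (fun d n p => PySem.Dict.modify d n [] (· ++ [p])) st.2 p)) := by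
    funext st p
    rcases hm : pvMin ((pvNbrs R C p).map (fun n => (pvHeight grid n, n))) with _ | mn
    · simp [stepK, gfun, pfun, hm]
    · by_cases hlt : mn.1 < pvHeight grid p <;> simp [stepK, gfun, pfun, hm, hlt]
  rw [hbody, PySem.List.foldl_prod_mk
    (f := fun s p => if gfun R C grid p = some none then PySem.Set.add s p else s)
    (g := stepK (pfun R C grid) (fun d n p => PySem.Dict.modify d n [] (· ++ [p])))]
  rfl

theorem rootsAcc_mem {R C : Int} {grid : List (List Int)} (x : Int × Int) :
    x ∈ rootsAcc R C grid ↔ x ∈ pvCells R C ∧ gfun R C grid x = some none := by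
  unfold rootsAcc
  rw [PySem.List.foldl_ite_eq_foldl_filter]
  rw [show List.foldl PySem.Set.add PySem.Set.empty
      ((pvCells R C).filter (fun x => decide (gfun R C grid x = some none)))
      = PySem.Set.update PySem.Set.empty
        ((pvCells R C).filter (fun x => decide (gfun R C grid x = some none))) from rfl]
  rw [PySem.Set.mem_update, List.mem_filter]
  simp [PySem.Set.empty]

theorem cmapAcc_getD {R C : Int} {grid : List (List Int)} (q : Int × Int) :
    (cmapAcc R C grid).getD q [] = childrenL R C grid q := by
  unfold cmapAcc
  rw [foldl_opt_pair]
  rw [PySem.Dict.getD_foldl_modify_append]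
  rw [filterMap_filter_snd]
  simp [childrenL, PySem.Dict.getD_empty]

theorem cmapAcc_contains {R C : Int} {grid : List (List Int)} (q : Int × Int) :
    (cmapAcc R C grid).contains q = true ↔ childrenL R C grid q ≠ [] := by
  unfold cmapAcc
  rw [foldl_opt_pair]
  rw [PySem.Dict.contains_iff_mem_keys]
  rw [PySem.Dict.keys_foldl_modify_key
    (key := fun px : (Int × Int) × (Int × Int) => px.1)]
  rw [PySem.Dict.keys_empty]
  constructor
  · intro h
    have := (PySem.Set.mem_update _ _ _).mp h
    rcases this with h | h
    · cases h
    · simp only [List.mem_map, List.mem_filterMap] at h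
      obtain ⟨px, ⟨x, hx, hpx⟩, hq⟩ := h
      rcases hk : pfun R C grid x with _ | n
      · rw [hk] at hpx; cases hpx
      · rw [hk] at hpx
        simp only [Option.map_some] at hpx
        cases hpx
        subst hq
        intro hnil
        have : x ∈ childrenL R C grid (n, x).1 := mem_childrenL.mpr ⟨hx, hk⟩
        rw [hnil] at this
        cases this
  · intro h
    obtain ⟨c, hc⟩ := List.exists_mem_of_ne_nil _ h
    obtain ⟨hcc, hcp⟩ := mem_childrenL.mp hc
    apply (PySem.Set.mem_update _ _ _).mpr
    right
    simp only [List.mem_map, List.mem_filterMap]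
    exact ⟨(q, c), ⟨c, hcc, by rw [hcp]; rfl⟩, rfl⟩

theorem cmapAcc_get? {R C : Int} {grid : List (List Int)} (q : Int × Int) :
    (cmapAcc R C grid).get? q
      = if childrenL R C grid q = [] then none else some (childrenL R C grid q) := by
  by_cases hnil : childrenL R C grid q = []
  · rw [if_pos hnil]
    rw [PySem.Dict.get?_eq_none_iff_contains]
    rcases hcon : (cmapAcc R C grid).contains q
    · rfl
    · exact absurd ((cmapAcc_contains q).mp hcon) (by simp [hnil])
  · rw [if_neg hnil]
    have hcon : (cmapAcc R C grid).contains q = true := (cmapAcc_contains q).mpr hnil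
    have hsome : ((cmapAcc R C grid).get? q).isSome = true := by
      rw [← PySem.Dict.contains_eq_isSome_get?]; exact hcon
    obtain ⟨v, hv⟩ := Option.isSome_iff_exists.mp hsome
    rw [hv]
    have := PySem.Dict.getD_eq_get?_getD (cmapAcc R C grid) q []
    rw [cmapAcc_getD, hv] at this
    simp at this
    rw [this]

theorem treeSizeA_eval {R C : Int} {grid : List (List Int)} :
    ∀ (f : Nat) (stack : List (Int × Int)) (count : Int),
      (∀ p ∈ stack, p ∈ pvCells R C) →
      (stack.map (fun p => (descL R C grid p).length)).sum ≤ f →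
      treeSizeA f stack count (cmapAcc R C grid)
        = count + ((stack.map (fun p => (descL R C grid p).length)).sum : Int) := by
  intro f
  induction f with
  | zero =>
    intro stack count hmem hsum
    have h0 : (stack.map (fun p => (descL R C grid p).length)).sum = 0 := Nat.le_zero.mp hsum
    simp [treeSizeA, h0]
  | succ f ih =>
    intro stack count hmem hsum
    rcases List.eq_nil_or_concat stack with rfl | ⟨rest, fr, rfl⟩
    · simp [treeSizeA]
    · simp only [List.concat_eq_append] at hmem hsum ⊢
      have hfr : fr ∈ pvCells R C := hmem fr (by simp)
      have hrest : ∀ p ∈ rest, p ∈ pvCells R C := fun p hp => hmem p (by simp [hp])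
      have hdec := descL_decomp (grid := grid) hfr
      have hsapp : ((rest ++ [fr]).map (fun p => (descL R C grid p).length)).sum
          = (rest.map (fun p => (descL R C grid p).length)).sum + (descL R C grid fr).length := by
        simp
      rw [treeSizeA, List.getLast?_concat]
      simp only [List.dropLast_concat]
      rw [cmapAcc_get? fr]
      by_cases hch : childrenL R C grid fr = []
      · rw [if_pos hch]
        show treeSizeA f rest (count + 1) (cmapAcc R C grid) = _
        have h1 : (descL R C grid fr).length = 1 := by rw [hdec, hch]; simp
        rw [ih rest (count + 1) hrest (by omega)]
        rw [hsapp, h1]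
        push_cast
        ring
      · rw [if_neg hch]
        have hchm : ∀ p ∈ rest ++ childrenL R C grid fr, p ∈ pvCells R C := by
          intro p hp
          rcases List.mem_append.mp hp with hp | hp
          · exact hrest p hp
          · exact (mem_childrenL.mp hp).1
        have hs2 : ((rest ++ childrenL R C grid fr).map (fun p => (descL R C grid p).length)).sum
            = (rest.map (fun p => (descL R C grid p).length)).sum
              + ((childrenL R C grid fr).map (fun c => (descL R C grid c).length)).sum := by
          simp
        show treeSizeA f (rest ++ childrenL R C grid fr) (count + 1) (cmapAcc R C grid) = _
        rw [ih (rest ++ childrenL R C grid fr) (count + 1) hchm (by omega)]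
        rw [hsapp, hs2, hdec]
        push_cast
        ring

theorem chaseB_eq_rootP {R C : Int} {grid : List (List Int)} :
    ∀ (f : Nat) (x : Int × Int), x ∈ pvCells R C → hMeasure R C grid x ≤ f →
      chaseB f x (parentMap R C grid) = rootP R C grid x := by
  intro f
  induction f with
  | zero =>
    intro x hx hm
    rcases hp : pfun R C grid x with _ | n
    · rw [rootP_of_none hp]; rfl
    · exfalso
      have := pfun_measure_lt hp
      omega
  | succ f ih =>
    intro x hx hm
    rw [chaseB, parentMap_get? x, if_pos hx]
    rcases hp : pfun R C grid x with _ | n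
    · rw [rootP_of_none hp]
      rcases hg : gfun R C grid x with _ | v
      · rfl
      · rcases v with _ | m
        · rfl
        · rw [pfun_of_gfun hg] at hp; cases hp
    · rw [rootP_of_some hp, gfun_of_pfun_some hp]
      exact ih n (pfun_spec hp).2 (by have := pfun_measure_lt hp; omega)

theorem counts_getD {R C : Int} {grid : List (List Int)} (v : Int × Int) :
    ((pvCells R C).foldl (fun cnt p =>
        let root := chaseB (R.toNat * C.toNat) p (parentMap R C grid)
        cnt.insert root (cnt.getD root 0 + 1))
      (PySem.Dict.empty : PySem.Dict (Int × Int) Int)).getD v 0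
      = ((pvCells R C).countP
          (fun x => chaseB (R.toNat * C.toNat) x (parentMap R C grid) == v) : Int) := by
  rw [← List.foldl_map (f := fun p => chaseB (R.toNat * C.toNat) p (parentMap R C grid))
      (g := fun (cnt : PySem.Dict (Int × Int) Int) k => cnt.insert k (cnt.getD k 0 + 1))]
  rw [PySem.Dict.getD_foldl_insert_add_one]
  rw [PySem.Dict.getD_empty]
  rw [List.count_eq_countP, List.countP_map, zero_add]
  exact congrArg _ (List.countP_congr (fun x _ => Iff.rfl))

theorem root_count {R C : Int} {grid : List (List Int)} {p : Int × Int}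
    (_hp : p ∈ pvCells R C) (hroot : pfun R C grid p = none) :
    (pvCells R C).countP
        (fun x => chaseB (R.toNat * C.toNat) x (parentMap R C grid) == p)
      = (descL R C grid p).length := by
  rw [length_descL]
  apply List.countP_congr
  intro x hx
  have hfuel : hMeasure R C grid x ≤ R.toNat * C.toNat := by
    have h1 := hMeasure_lt_length (grid := grid) hx
    rw [length_pvCells] at h1
    omega
  rw [chaseB_eq_rootP _ x hx hfuel]
  by_cases hmem : p ∈ chainP R C grid x
  · have he : rootP R C grid x = p := by
      rw [rootP_eq_of_mem hmem, rootP_of_none hroot]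
    simp [he, hmem]
  · have he : rootP R C grid x ≠ p := by
      intro he
      exact hmem (he ▸ rootP_mem_chainP x)
    simp [he, hmem]

theorem solve_eq {R C : Int} {grid : List (List Int)} (hne : ¬(R = 1 ∧ C = 1)) :
    solve R C grid
      = (PySem.List.pyRange 0 R 1).map (fun r => (PySem.List.pyRange 0 C 1).map (fun c =>
          if (r, c) ∈ pvCells R C ∧ gfun R C grid (r, c) = some none
          then ((descL R C grid (r, c)).length : Int) else 0)) := by
  unfold solve
  rw [if_neg hne]
  show (PySem.List.pyRange 0 R 1).map (fun r => (PySem.List.pyRange 0 C 1).map (fun c =>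
      if PySem.Set.contains ((pvCells R C).foldl (fun st p =>
          match pvMin ((pvNbrs R C p).map (fun n => (pvHeight grid n, n))) with
          | none => st
          | some mn =>
            if mn.1 < pvHeight grid p then (st.1, PySem.Dict.modify st.2 mn.2 [] (· ++ [p]))
            else (PySem.Set.add st.1 p, st.2))
        ((PySem.Set.empty : PySem.Set (Int × Int)),
         (PySem.Dict.empty : PySem.Dict (Int × Int) (List (Int × Int))))).1 (r, c)
      then treeSizeA (R.toNat * C.toNat + 1) [(r, c)] 0 ((pvCells R C).foldl (fun st p =>
          match pvMin ((pvNbrs R C p).map (fun n => (pvHeight grid n, n))) with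
          | none => st
          | some mn =>
            if mn.1 < pvHeight grid p then (st.1, PySem.Dict.modify st.2 mn.2 [] (· ++ [p]))
            else (PySem.Set.add st.1 p, st.2))
        ((PySem.Set.empty : PySem.Set (Int × Int)),
         (PySem.Dict.empty : PySem.Dict (Int × Int) (List (Int × Int))))).2 else 0)) = _
  rw [solve_st]
  apply List.map_congr_left
  intro r _
  apply List.map_congr_left
  intro c _
  by_cases hcond : (r, c) ∈ pvCells R C ∧ gfun R C grid (r, c) = some none
  · have hcont : PySem.Set.contains (rootsAcc R C grid) (r, c) = true :=
      (PySem.Set.contains_iff _ _).mpr ((rootsAcc_mem _).mpr hcond)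
    rw [if_pos hcont, if_pos hcond]
    have hev := treeSizeA_eval (grid := grid) (R.toNat * C.toNat + 1) [(r, c)] 0
      (by intro p hp; simp at hp; subst hp; exact hcond.1)
      (by
        simp only [List.map_cons, List.map_nil, List.sum_cons, List.sum_nil, Nat.add_zero]
        have := length_descL_le (R := R) (C := C) (grid := grid) (r, c)
        omega)
    rw [hev]
    simp
  · have hcont : ¬ PySem.Set.contains (rootsAcc R C grid) (r, c) = true := by
      intro h
      exact hcond ((rootsAcc_mem _).mp ((PySem.Set.contains_iff _ _).mp h))
    rw [if_neg hcont, if_neg hcond]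

theorem alt_eq {R C : Int} {grid : List (List Int)} (hne : ¬(R = 1 ∧ C = 1)) :
    solve_alt R C grid
      = (PySem.List.pyRange 0 R 1).map (fun r => (PySem.List.pyRange 0 C 1).map (fun c =>
          if (r, c) ∈ pvCells R C ∧ gfun R C grid (r, c) = some none
          then ((descL R C grid (r, c)).length : Int) else 0)) := by
  unfold solve_alt
  rw [if_neg hne]
  show (PySem.List.pyRange 0 R 1).map (fun r => (PySem.List.pyRange 0 C 1).map (fun c =>
      match (parentMap R C grid).get? (r, c) with
      | some none =>
        ((pvCells R C).foldl (fun (cnt : PySem.Dict (Int × Int) Int) p =>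
            let root := chaseB (R.toNat * C.toNat) p (parentMap R C grid)
            cnt.insert root (cnt.getD root 0 + 1))
          (PySem.Dict.empty : PySem.Dict (Int × Int) Int)).getD (r, c) 0
      | _ => 0)) = _
  apply List.map_congr_left
  intro r hr
  apply List.map_congr_left
  intro c hc
  have hcell : (r, c) ∈ pvCells R C := by
    rw [PySem.List.mem_pyRange_one] at hr hc
    exact mem_pvCells.mpr ⟨hr.1, hr.2, hc.1, hc.2⟩
  rw [parentMap_get? (r, c), if_pos hcell]
  rcases hg : gfun R C grid (r, c) with _ | v
  · rw [if_neg (by simp)]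
  · rcases v with _ | n
    · rw [if_pos ⟨hcell, rfl⟩]
      have hpn : pfun R C grid (r, c) = none := by
        unfold pfun
        rw [hg]
      rw [counts_getD, root_count hcell hpn]
    · rw [if_neg (by simp)]


-- ===== VERDICT (by name: the statement is the Claim_ definition above) =====
theorem solve_spec : Claim_equal_solve := by
  unfold Claim_equal_solve
  intro R C grid _ _
  unfold Spec_solve
  by_cases hne : R = 1 ∧ C = 1
  · unfold solve solve_alt
    rw [if_pos hne, if_pos hne]
  · rw [solve_eq hne, alt_eq hne]
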